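-- pv_equiv track=rewrite | github.com/1141931260-jpg/- | trendradar/watch/bilibili_up.py | _parse_bili_yaml
-- ===== SOURCE A (Python) =====
-- from typing import Any, Dict, List, Optional
--
-- def _parse_bili_yaml(output: str) -> List[Dict[str, str]]:
--     """解析 bili-cli YAML 格式输出（回退方案）。"""
--     videos: List[Dict[str, str]] = []
--     current: Dict[str, str] = {}
--
--     for line in output.split("\n"):
--         line = line.rstrip()
--         if line.startswith("- id: "):
--             if current.get("bv"):
--                 videos.append(current)
--             current = {"bv": line[6:].strip()}
--         elif line.startswith("  bvid: "):
--             current["bv"] = line[8:].strip()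
--         elif line.startswith("  title: "):
--             current["title"] = line[9:].strip()
--         elif line.startswith("  author: "):
--             current["uploader"] = line[10:].strip()
--
--     if current.get("bv"):
--         videos.append(current)
--     return videos
-- ===== SOURCE B (Python) =====
-- from typing import Dict, List
--
-- _FIELDS = [("- id: ", "bv"), ("  bvid: ", "bv"), ("  title: ", "title"), ("  author: ", "uploader")]
--
-- def _parse_bili_yaml(output: str) -> List[Dict[str, str]]:
--     """Group lines into '- id: '-delimited blocks, then build each dict from a prefix->key table."""
--     lines = [ln.rstrip() for ln in output.split("\n")]
--     blocks: List[List[str]] = []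
--     buf: List[str] = []
--     for ln in lines:
--         if ln.startswith("- id: "):
--             blocks.append(buf)
--             buf = [ln]
--         else:
--             buf.append(ln)
--     blocks.append(buf)
--
--     videos: List[Dict[str, str]] = []
--     for block in blocks:
--         d: Dict[str, str] = {}
--         for ln in block:
--             for pre, key in _FIELDS:
--                 if ln.startswith(pre):
--                     d[key] = ln[len(pre):].strip()
--                     break
--         if d.get("bv"):
--             videos.append(d)
--     return videos
-- ===== Notes on version B (the rewrite author's own statement) =====
-- stated objective: alternative
-- what changed: Replaces A's single-pass state machine (carried current-dict with flush-on-'- id: ' and an elif chain per line) by a two-phase decomposition: first group the lines into '- id: '-delimited blocks, then build each block's dict via a prefix-to-key table scan and keep it iff its 'bv' is truthy.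
import Mathlib
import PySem

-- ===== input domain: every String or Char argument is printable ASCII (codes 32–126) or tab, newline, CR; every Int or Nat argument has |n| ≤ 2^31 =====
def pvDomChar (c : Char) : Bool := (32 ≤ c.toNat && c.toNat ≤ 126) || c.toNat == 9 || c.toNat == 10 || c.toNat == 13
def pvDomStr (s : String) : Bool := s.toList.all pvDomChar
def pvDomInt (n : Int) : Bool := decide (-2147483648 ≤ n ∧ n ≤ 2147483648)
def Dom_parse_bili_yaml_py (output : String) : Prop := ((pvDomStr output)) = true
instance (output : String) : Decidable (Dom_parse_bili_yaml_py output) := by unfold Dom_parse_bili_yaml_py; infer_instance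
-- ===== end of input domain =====

set_option maxHeartbeats 1000000


-- B is an ALTERNATIVE decomposition of A (group the lines into '- id: '-delimited blocks, then build
-- each block's dict from a prefix→key table) returning the same value; no speed claim is made.

-- truthiness of current.get("bv") / d.get("bv"): key present with a non-empty value
def pvTruthyBv (d : PySem.Dict String String) : Bool :=
  match d.get? "bv" with
  | some s => !(s == "")
  | none => false

-- output.split("\n"): sep ≠ "" so split? is always some
def pvLines (output : String) : List String := (PySem.Str.split? output "\n").getD []

-- ===== PORT A =====
-- one iteration of A's for-loop: state = (videos, current); the elif chain in A's order
def pvStepA (st : List (PySem.Dict String String) × PySem.Dict String String) (line0 : String) :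
    List (PySem.Dict String String) × PySem.Dict String String :=
  let line := PySem.Str.rstrip line0
  if PySem.Str.startswith line "- id: " then
    ((if pvTruthyBv st.2 then st.1 ++ [st.2] else st.1),
     PySem.Dict.ofList [("bv", PySem.Str.strip (PySem.Str.slice line (some 6) none))])
  else if PySem.Str.startswith line "  bvid: " then
    (st.1, st.2.insert "bv" (PySem.Str.strip (PySem.Str.slice line (some 8) none)))
  else if PySem.Str.startswith line "  title: " then
    (st.1, st.2.insert "title" (PySem.Str.strip (PySem.Str.slice line (some 9) none)))
  else if PySem.Str.startswith line "  author: " then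
    (st.1, st.2.insert "uploader" (PySem.Str.strip (PySem.Str.slice line (some 10) none)))
  else st

def parse_bili_yaml_py (output : String) : List (List (String × String)) :=
  let st := (pvLines output).foldl pvStepA ([], PySem.Dict.empty)
  let videos := if pvTruthyBv st.2 then st.1 ++ [st.2] else st.1
  videos.map PySem.Dict.items

-- ===== PORT B =====
-- the _FIELDS prefix → key table
def pvFields : List (String × String) :=
  [("- id: ", "bv"), ("  bvid: ", "bv"), ("  title: ", "title"), ("  author: ", "uploader")]

-- one line of phase 2: the inner 'for pre, key in _FIELDS: … break' scan
def pvApplyLine (d : PySem.Dict String String) (ln : String) : PySem.Dict String String :=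
  match pvFields.find? (fun pk => PySem.Str.startswith ln pk.1) with
  | some (pre, key) => d.insert key (PySem.Str.strip (PySem.Str.slice ln (some (PySem.Str.len pre)) none))
  | none => d

-- one line of phase 1: start a new block at a '- id: ' line, else extend the buffer
def pvGroupStep (st : List (List String) × List String) (ln : String) :
    List (List String) × List String :=
  if PySem.Str.startswith ln "- id: " then (st.1 ++ [st.2], [ln]) else (st.1, st.2 ++ [ln])

-- phase 2 per block: d = {} then apply every line of the block
def pvBuild (block : List String) : PySem.Dict String String :=
  block.foldl pvApplyLine PySem.Dict.empty

-- one block of phase 2: keep the block's dict iff its 'bv' is truthy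
def pvEmitStep (acc : List (PySem.Dict String String)) (block : List String) :
    List (PySem.Dict String String) :=
  let d := pvBuild block
  if pvTruthyBv d then acc ++ [d] else acc

def parse_bili_yaml_py_alt (output : String) : List (List (String × String)) :=
  let lines := (pvLines output).map PySem.Str.rstrip
  let st := lines.foldl pvGroupStep ([], [])
  let blocks := st.1 ++ [st.2]
  let videos := blocks.foldl pvEmitStep []
  videos.map PySem.Dict.items

-- ===== PRECONDITION & SPEC =====
def Spec_parse_bili_yaml_py (output : String) (out : List (List (String × String))) : Prop := out = parse_bili_yaml_py_alt output
instance (output : String) (out : List (List (String × String))) : Decidable (Spec_parse_bili_yaml_py output out) := by unfold Spec_parse_bili_yaml_py; infer_instance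

-- ===== CLAIM (what is proved, stated in full; the proofs are below) =====
def Claim_equal_parse_bili_yaml_py : Prop := ∀ (output : String), Dom_parse_bili_yaml_py output → Spec_parse_bili_yaml_py output (parse_bili_yaml_py output)

-- ===== LEMMAS AND PROOFS =====

-- the videos emitted by a finished current-dict
def pvEmit (d : PySem.Dict String String) : List (PySem.Dict String String) :=
  if pvTruthyBv d then [d] else []

-- common intermediate form: the videos produced from (already rstripped) lines, starting from cur
def pvBfin (cur : PySem.Dict String String) : List String → List (PySem.Dict String String)
  | [] => pvEmit cur
  | l :: ls =>
    if PySem.Str.startswith l "- id: " then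
      pvEmit cur ++ pvBfin (pvApplyLine PySem.Dict.empty l) ls
    else
      pvBfin (pvApplyLine cur l) ls

theorem pvlen2 : PySem.Str.len "  bvid: " = 8 := by rfl
theorem pvlen3 : PySem.Str.len "  title: " = 9 := by rfl
theorem pvlen4 : PySem.Str.len "  author: " = 10 := by rfl

-- B's table scan agrees with A's elif chain on a non-'- id: ' line
theorem pvApplyLine_nonid (cur : PySem.Dict String String) (r : String)
    (h : PySem.Str.startswith r "- id: " = false) :
    pvApplyLine cur r =
      (if PySem.Str.startswith r "  bvid: " then
        cur.insert "bv" (PySem.Str.strip (PySem.Str.slice r (some 8) none))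
      else if PySem.Str.startswith r "  title: " then
        cur.insert "title" (PySem.Str.strip (PySem.Str.slice r (some 9) none))
      else if PySem.Str.startswith r "  author: " then
        cur.insert "uploader" (PySem.Str.strip (PySem.Str.slice r (some 10) none))
      else cur) := by
  rw [pvApplyLine, pvFields]
  rcases h1 : PySem.Str.startswith r "  bvid: " <;>
    rcases h2 : PySem.Str.startswith r "  title: " <;>
      rcases h3 : PySem.Str.startswith r "  author: " <;>
        simp only [List.find?, h, h1, h2, h3, pvlen2, pvlen3, pvlen4,
          Bool.false_eq_true, if_false, if_true]

-- B's table scan on a '- id: ' line from the empty dict is A's fresh dict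
theorem pvApplyLine_id (r : String) (h : PySem.Str.startswith r "- id: " = true) :
    pvApplyLine PySem.Dict.empty r =
      PySem.Dict.ofList [("bv", PySem.Str.strip (PySem.Str.slice r (some 6) none))] := by
  rw [pvApplyLine, pvFields]
  simp only [List.find?, h]
  rfl

-- A's fold, finished, equals pvBfin over the rstripped lines
theorem pvA_eq_bfin (lines : List String)
    (vids : List (PySem.Dict String String)) (cur : PySem.Dict String String) :
    (if pvTruthyBv (lines.foldl pvStepA (vids, cur)).2
      then (lines.foldl pvStepA (vids, cur)).1 ++ [(lines.foldl pvStepA (vids, cur)).2]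
      else (lines.foldl pvStepA (vids, cur)).1)
      = vids ++ pvBfin cur (lines.map PySem.Str.rstrip) := by
  induction lines generalizing vids cur with
  | nil =>
    show (if pvTruthyBv cur then vids ++ [cur] else vids) = vids ++ pvBfin cur []
    rw [show pvBfin cur [] = pvEmit cur from rfl]
    unfold pvEmit
    split <;> simp
  | cons l ls ih =>
    simp only [List.foldl_cons, List.map_cons, pvBfin]
    rcases hid : PySem.Str.startswith (PySem.Str.rstrip l) "- id: " with _ | _
    · have hs : pvStepA (vids, cur) l = (vids, pvApplyLine cur (PySem.Str.rstrip l)) := by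
        rw [pvApplyLine_nonid _ _ hid]
        simp only [pvStepA, hid, Bool.false_eq_true, if_false]
        split_ifs <;> rfl
      rw [hs]
      simp only [Bool.false_eq_true, if_false]
      exact ih vids _
    · have hs : pvStepA (vids, cur) l =
          ((if pvTruthyBv cur then vids ++ [cur] else vids),
            pvApplyLine PySem.Dict.empty (PySem.Str.rstrip l)) := by
        simp only [pvStepA, hid, if_true]
        rw [pvApplyLine_id _ hid]
      rw [hs]
      simp only [if_true]
      rw [ih]
      unfold pvEmit
      split <;> simp

-- one emit step appends the block's contribution
theorem pvEmitStep_eq (acc : List (PySem.Dict String String)) (b : List String) :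
    pvEmitStep acc b = acc ++ pvEmit (pvBuild b) := by
  unfold pvEmitStep pvEmit
  split_ifs with h <;> simp [h]

-- B's two phases, started from any (blocks, buffer) state, equal pvBfin
theorem pvB_eq_bfin (lines : List String) (bs : List (List String)) (buf : List String) :
    ((lines.foldl pvGroupStep (bs, buf)).1 ++ [(lines.foldl pvGroupStep (bs, buf)).2]).foldl
        pvEmitStep []
      = bs.foldl pvEmitStep [] ++ pvBfin (pvBuild buf) lines := by
  induction lines generalizing bs buf with
  | nil =>
    show (bs ++ [buf]).foldl pvEmitStep [] = bs.foldl pvEmitStep [] ++ pvBfin (pvBuild buf) []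
    rw [List.foldl_append, show pvBfin (pvBuild buf) [] = pvEmit (pvBuild buf) from rfl]
    simp only [List.foldl_cons, List.foldl_nil]
    exact pvEmitStep_eq _ _
  | cons l ls ih =>
    simp only [List.foldl_cons]
    rcases hid : PySem.Str.startswith l "- id: " with _ | _
    · have hg : pvGroupStep (bs, buf) l = (bs, buf ++ [l]) := by
        simp only [pvGroupStep, hid, Bool.false_eq_true, if_false]
      rw [hg, ih]
      have hb : pvBuild (buf ++ [l]) = pvApplyLine (pvBuild buf) l := by
        rw [pvBuild, pvBuild, List.foldl_append]
        rfl
      rw [hb, show pvBfin (pvBuild buf) (l :: ls)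
            = pvBfin (pvApplyLine (pvBuild buf) l) ls from by
          simp only [pvBfin, hid, Bool.false_eq_true, if_false]]
    · have hg : pvGroupStep (bs, buf) l = (bs ++ [buf], [l]) := by
        simp only [pvGroupStep, hid, if_true]
      rw [hg, ih, List.foldl_append]
      simp only [List.foldl_cons, List.foldl_nil]
      rw [pvEmitStep_eq, show pvBuild [l] = pvApplyLine PySem.Dict.empty l from rfl,
        show pvBfin (pvBuild buf) (l :: ls)
            = pvEmit (pvBuild buf) ++ pvBfin (pvApplyLine PySem.Dict.empty l) ls from by
          simp only [pvBfin, hid, if_true]]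
      simp [List.append_assoc]

-- ===== VERDICT (by name: the statement is the Claim_ definition above) =====
theorem parse_bili_yaml_py_spec : Claim_equal_parse_bili_yaml_py := by
  intro output _
  unfold Spec_parse_bili_yaml_py
  show (if pvTruthyBv ((pvLines output).foldl pvStepA ([], PySem.Dict.empty)).2
        then ((pvLines output).foldl pvStepA ([], PySem.Dict.empty)).1
          ++ [((pvLines output).foldl pvStepA ([], PySem.Dict.empty)).2]
        else ((pvLines output).foldl pvStepA ([], PySem.Dict.empty)).1).map PySem.Dict.items
      = (((((pvLines output).map PySem.Str.rstrip).foldl pvGroupStep ([], [])).1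
          ++ [(((pvLines output).map PySem.Str.rstrip).foldl pvGroupStep ([], [])).2]).foldl
            pvEmitStep []).map PySem.Dict.items
  rw [pvA_eq_bfin, pvB_eq_bfin, show pvBuild [] = PySem.Dict.empty from rfl]
  simp
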